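-- pv_equiv track=rewrite | github.com/dust-tt/dust | front/lib/api/sandbox/image/profile/_dust_tools.py | safe_output
-- ===== SOURCE A (Python) =====
-- MAX_OUTPUT_BYTES = 48_000  # 2KB headroom for TS-level truncation
--
-- MAX_OUTPUT_LINES = 1_500   # Headroom for formatExecOutput's 2000-line cap
--
-- def safe_output(text, max_bytes=MAX_OUTPUT_BYTES, max_lines=MAX_OUTPUT_LINES):
--     """Truncate text at a line boundary to fit within byte and line budgets."""
--     lines = text.splitlines()
--     if (
--         len(lines) <= max_lines
--         and len(text.encode("utf-8", errors="replace")) <= max_bytes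
--     ):
--         return text, False
--
--     result_lines = []
--     current_bytes = 0
--     was_truncated = False
--     for index, line in enumerate(lines):
--         if index >= max_lines:
--             was_truncated = True
--             break
--         line_bytes = len((line + "\n").encode("utf-8", errors="replace"))
--         if current_bytes + line_bytes > max_bytes:
--             was_truncated = True
--             break
--         result_lines.append(line)
--         current_bytes += line_bytes
--
--     return "\n".join(result_lines), was_truncated
-- ===== SOURCE B (Python) =====
-- MAX_OUTPUT_BYTES = 48_000
-- MAX_OUTPUT_LINES = 1_500
--
-- def safe_output(text, max_bytes=MAX_OUTPUT_BYTES, max_lines=MAX_OUTPUT_LINES):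
--     """Truncate text at a line boundary to fit within byte and line budgets."""
--     lines = text.splitlines()
--     if (
--         len(lines) <= max_lines
--         and len(text.encode("utf-8", errors="replace")) <= max_bytes
--     ):
--         return text, False
--
--     # Cumulative byte costs of the newline-terminated lines, then an
--     # arithmetic cutoff instead of a break-out loop with flag state.
--     cum = []
--     total = 0
--     for line in lines:
--         total += len((line + "\n").encode("utf-8", errors="replace"))
--         cum.append(total)
--     k = sum(1 for c in cum if c <= max_bytes)
--     cutoff = max(0, min(k, max_lines))
--     return "\n".join(lines[:cutoff]), cutoff < len(lines)
-- ===== Notes on version B (the rewrite author's own statement) =====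
-- stated objective: alternative
-- what changed: Replaces A's break-out accumulation loop (mutable result list, byte counter and truncation flag) by cumulative per-line byte costs, a count of prefix sums within budget, and an arithmetic cutoff = max(0, min(k, max_lines)) driving a single slice/join; was_truncated becomes cutoff < len(lines).
import Mathlib
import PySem

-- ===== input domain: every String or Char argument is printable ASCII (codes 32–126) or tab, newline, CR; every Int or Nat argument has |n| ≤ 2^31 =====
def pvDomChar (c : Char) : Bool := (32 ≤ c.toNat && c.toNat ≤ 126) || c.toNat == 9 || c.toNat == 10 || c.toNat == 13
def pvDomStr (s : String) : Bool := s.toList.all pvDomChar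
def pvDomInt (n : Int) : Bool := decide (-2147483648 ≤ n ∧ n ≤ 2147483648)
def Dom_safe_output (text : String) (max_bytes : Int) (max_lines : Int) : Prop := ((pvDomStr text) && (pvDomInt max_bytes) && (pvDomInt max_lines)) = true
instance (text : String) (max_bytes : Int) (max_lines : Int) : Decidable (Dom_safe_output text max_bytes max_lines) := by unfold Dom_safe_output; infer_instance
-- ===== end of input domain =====

-- B replaces A's break-out accumulation loop by cumulative byte costs, a count of
-- prefix sums within budget, and an arithmetic cutoff driving one slice/join (alternative, same cost).

-- ===== PORT A =====
-- the 'for index, line in enumerate(lines)' loop: acc = result_lines, cur = current_bytes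
-- len((line+"\n").encode("utf-8", errors="replace")) is ported as PySem.Str.len line + 1:
-- exact on the ASCII Dom (every char is one UTF-8 byte, and lines from splitlines carry no newline).
def safe_output_loop (max_bytes max_lines : Int) : List String → Int → List String → Int → List String × Bool
  | [], _, acc, _ => (acc, false)
  | l :: rest, idx, acc, cur =>
    if max_lines ≤ idx then (acc, true)
    else
      let line_bytes := PySem.Str.len l + 1
      if max_bytes < cur + line_bytes then (acc, true)
      else safe_output_loop max_bytes max_lines rest (idx + 1) (acc ++ [l]) (cur + line_bytes)

def safe_output (text : String) (max_bytes : Int) (max_lines : Int) : String × Bool :=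
  let lines := PySem.Str.splitlines text
  -- len(text.encode("utf-8", errors="replace")) = PySem.Str.len text: exact on the ASCII Dom
  if (lines.length : Int) ≤ max_lines ∧ PySem.Str.len text ≤ max_bytes then (text, false)
  else
    let r := safe_output_loop max_bytes max_lines lines 0 [] 0
    (PySem.Str.join "\n" r.1, r.2)

-- ===== PORT B =====
def safe_output_alt (text : String) (max_bytes : Int) (max_lines : Int) : String × Bool :=
  let lines := PySem.Str.splitlines text
  if (lines.length : Int) ≤ max_lines ∧ PySem.Str.len text ≤ max_bytes then (text, false)
  else
    -- cum: running totals of the per-line byte costs (same UTF-8-on-ASCII reading as in port A)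
    let cum := (lines.foldl (fun (p : List Int × Int) line =>
      let total := p.2 + (PySem.Str.len line + 1)
      (p.1 ++ [total], total)) ([], 0)).1
    -- k = sum(1 for c in cum if c <= max_bytes)
    let k : Int := cum.foldl (fun n c => if c ≤ max_bytes then n + 1 else n) 0
    let cutoff := max 0 (min k max_lines)
    (PySem.Str.join "\n" (PySem.List.slice lines none (some cutoff)),
     decide (cutoff < (lines.length : Int)))

-- ===== PRECONDITION & SPEC =====
def Spec_safe_output (text : String) (max_bytes : Int) (max_lines : Int) (out : String × Bool) : Prop := out = safe_output_alt text max_bytes max_lines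
instance (text : String) (max_bytes : Int) (max_lines : Int) (out : String × Bool) : Decidable (Spec_safe_output text max_bytes max_lines out) := by unfold Spec_safe_output; infer_instance

-- ===== CLAIM (what is proved, stated in full; the proofs are below) =====
def Claim_equal_safe_output : Prop := ∀ (text : String) (max_bytes : Int) (max_lines : Int), Dom_safe_output text max_bytes max_lines → Spec_safe_output text max_bytes max_lines (safe_output text max_bytes max_lines)

-- ===== LEMMAS AND PROOFS =====

-- number of leading lines whose running byte total stays within max_bytes
def pvKfun (max_bytes : Int) : List String → Int → Nat
  | [], _ => 0
  | l :: rest, cur =>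
    if cur + (PySem.Str.len l + 1) ≤ max_bytes then pvKfun max_bytes rest (cur + (PySem.Str.len l + 1)) + 1
    else 0

-- the list of running totals starting from cur
def pvRuns : List String → Int → List Int
  | [], _ => []
  | l :: rest, cur => (cur + (PySem.Str.len l + 1)) :: pvRuns rest (cur + (PySem.Str.len l + 1))

theorem pvLen_nonneg (s : String) : 0 ≤ PySem.Str.len s := by
  simp [PySem.Str.len_eq]

theorem pvCum_eq (ls : List String) : ∀ (acc : List Int) (t : Int),
    (ls.foldl (fun (p : List Int × Int) line =>
      (p.1 ++ [p.2 + (PySem.Str.len line + 1)], p.2 + (PySem.Str.len line + 1))) (acc, t)).1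
      = acc ++ pvRuns ls t := by
  induction ls with
  | nil => intro acc t; simp [pvRuns]
  | cons l rest ih =>
    intro acc t
    simpa [pvRuns, List.append_assoc] using ih (acc ++ [t + (PySem.Str.len l + 1)]) (t + (PySem.Str.len l + 1))

theorem pvCount_foldl (max_bytes : Int) (xs : List Int) : ∀ (n : Int),
    xs.foldl (fun n c => if c ≤ max_bytes then n + 1 else n) n
      = n + (xs.countP (fun c => decide (c ≤ max_bytes)) : Int) := by
  induction xs with
  | nil => intro n; simp
  | cons c rest ih =>
    intro n
    by_cases h : c ≤ max_bytes <;> simp [h, ih] <;> ring_nf <;> omega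

theorem pvRuns_lb (ls : List String) : ∀ (t c : Int), c ∈ pvRuns ls t → t ≤ c := by
  induction ls with
  | nil => intro t c h; simp [pvRuns] at h
  | cons l rest ih =>
    intro t c h
    have hl := pvLen_nonneg l
    rcases (by simpa [pvRuns] using h : c = t + (PySem.Str.len l + 1) ∨ c ∈ pvRuns rest (t + (PySem.Str.len l + 1))) with h | h
    · omega
    · have := ih _ _ h; omega

theorem pvCount_runs (max_bytes : Int) (ls : List String) : ∀ (t : Int),
    (pvRuns ls t).countP (fun c => decide (c ≤ max_bytes)) = pvKfun max_bytes ls t := by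
  induction ls with
  | nil => intro t; simp [pvRuns, pvKfun]
  | cons l rest ih =>
    intro t
    rw [pvRuns, pvKfun]
    by_cases h : t + (PySem.Str.len l + 1) ≤ max_bytes
    · rw [if_pos h, List.countP_cons_of_pos (by simpa using h), ih]
    · have hz : (pvRuns rest (t + (PySem.Str.len l + 1))).countP (fun c => decide (c ≤ max_bytes)) = 0 := by
        rw [List.countP_eq_zero]
        intro c hc
        have := pvRuns_lb rest _ _ hc
        simpa using by omega
      rw [if_neg h, List.countP_cons_of_neg (by simpa using h), hz]

theorem pvKfun_le (max_bytes : Int) (ls : List String) : ∀ (t : Int), pvKfun max_bytes ls t ≤ ls.length := by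
  induction ls with
  | nil => intro t; simp [pvKfun]
  | cons l rest ih =>
    intro t
    rw [pvKfun]
    split
    · simpa using Nat.add_le_add_right (ih _) 1
    · simp

theorem pvLoop_eq (max_bytes max_lines : Int) (ls : List String) : ∀ (i : Int) (acc : List String) (cur : Int),
    safe_output_loop max_bytes max_lines ls i acc cur
      = (acc ++ ls.take (min (pvKfun max_bytes ls cur) (max_lines - i).toNat),
         decide (min (pvKfun max_bytes ls cur) (max_lines - i).toNat < ls.length)) := by
  induction ls with
  | nil => intro i acc cur; simp [safe_output_loop, pvKfun]
  | cons l rest ih =>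
    intro i acc cur
    by_cases hi : max_lines ≤ i
    · have h0 : (max_lines - i).toNat = 0 := by omega
      simp [safe_output_loop, hi, h0]
    · by_cases hb : max_bytes < cur + (PySem.Str.len l + 1)
      · have hk : pvKfun max_bytes (l :: rest) cur = 0 := by
          rw [pvKfun, if_neg (by omega)]
        rw [safe_output_loop]
        simp only [if_neg hi, if_pos hb, hk]
        simp
      · have hk : pvKfun max_bytes (l :: rest) cur = pvKfun max_bytes rest (cur + (PySem.Str.len l + 1)) + 1 := by
          rw [pvKfun, if_pos (by omega)]
        have hmin : min (pvKfun max_bytes (l :: rest) cur) (max_lines - i).toNat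
            = min (pvKfun max_bytes rest (cur + (PySem.Str.len l + 1))) (max_lines - (i + 1)).toNat + 1 := by
          rw [hk]; omega
        rw [safe_output_loop]
        simp only [if_neg hi, if_neg hb]
        rw [ih (i + 1) (acc ++ [l]) (cur + (PySem.Str.len l + 1)), hmin]
        refine Prod.ext ?_ ?_
        · simp [List.take_succ_cons, List.append_assoc]
        · exact decide_eq_decide.mpr (by simp only [List.length_cons]; omega)

theorem safe_output_eq_alt (text : String) (max_bytes : Int) (max_lines : Int) :
    safe_output text max_bytes max_lines = safe_output_alt text max_bytes max_lines := by
  simp only [safe_output, safe_output_alt]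
  set lines := PySem.Str.splitlines text with hlines
  by_cases hfast : (lines.length : Int) ≤ max_lines ∧ PySem.Str.len text ≤ max_bytes
  · rw [if_pos hfast, if_pos hfast]
  · rw [if_neg hfast, if_neg hfast, pvLoop_eq, pvCum_eq]
    simp only [List.nil_append]
    simp only [pvCount_foldl, pvCount_runs]
    have hk_le := pvKfun_le max_bytes lines 0
    set K := pvKfun max_bytes lines 0 with hK
    have hcut0 : 0 ≤ max 0 (min (0 + (K : Int)) max_lines) := le_max_left _ _
    rw [PySem.List.slice_to _ hcut0]
    have htoNat : (max 0 (min (0 + (K : Int)) max_lines)).toNat = min K (max_lines - 0).toNat := by omega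
    rw [htoNat]
    have hflag : (min K (max_lines - 0).toNat < lines.length)
        ↔ (max 0 (min (0 + (K : Int)) max_lines) < (lines.length : Int)) := by omega
    rw [decide_eq_decide.mpr hflag]

-- ===== VERDICT (by name: the statement is the Claim_ definition above) =====
theorem safe_output_spec : Claim_equal_safe_output := by
  intro text max_bytes max_lines _
  unfold Spec_safe_output
  exact safe_output_eq_alt text max_bytes max_lines
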